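-- pv_equiv track=rewrite | github.com/pypi-data/pypi-mirror-99 | packages/scilib/scilib-0.0.13.tar.gz/scilib-0.0.13/scilib/antv/sankey.py | make_matrix_csv
-- ===== SOURCE A (Python) =====
-- def make_matrix_csv(nodes, edges):
--     lines = []
--     for nodea in nodes:
--         line = [nodea]
--         for nodeb in nodes:
--             count = len([True for a, b in edges if a == nodea and b == nodeb])
--             line.append(count)
--         lines.append(','.join([str(i) for i in line]))
--     return '\n'.join(lines)
-- ===== SOURCE B (Python) =====
-- def make_matrix_csv(nodes, edges):
--     index = {n: i for i, n in enumerate(nodes)}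
--     size = len(nodes)
--     matrix = [[0] * size for _ in nodes]
--     for a, b in edges:
--         if a in index and b in index:
--             matrix[index[a]][index[b]] += 1
--     return '\n'.join(
--         ','.join([a] + [str(matrix[index[a]][index[b]]) for b in nodes])
--         for a in nodes)
-- ===== Notes on version B (the rewrite author's own statement) =====
-- stated objective: faster
-- what changed: B scatters instead of gathers: it builds a node-to-position dict, pre-allocates a dense zero matrix, increments one cell per edge in a single pass, and then serializes the rows, whereas A rescans the whole edge list once for every (row, column) cell.
import Mathlib
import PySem

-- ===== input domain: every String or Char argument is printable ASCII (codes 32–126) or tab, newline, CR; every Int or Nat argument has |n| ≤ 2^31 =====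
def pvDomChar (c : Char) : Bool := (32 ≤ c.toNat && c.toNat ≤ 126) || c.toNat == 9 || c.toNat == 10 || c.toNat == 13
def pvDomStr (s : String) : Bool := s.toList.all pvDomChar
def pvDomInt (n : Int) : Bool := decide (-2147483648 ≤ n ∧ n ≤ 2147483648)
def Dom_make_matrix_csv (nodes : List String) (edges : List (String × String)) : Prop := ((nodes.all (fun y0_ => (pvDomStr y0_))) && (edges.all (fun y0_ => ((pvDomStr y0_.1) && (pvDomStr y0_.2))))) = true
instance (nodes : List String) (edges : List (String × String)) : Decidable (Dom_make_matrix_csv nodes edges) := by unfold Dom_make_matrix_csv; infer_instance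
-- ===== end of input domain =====

-- B scatters: one pass over the edges increments a pre-allocated dense integer matrix
-- (addressed through a node→position dict), then serializes; A gathers, rescanning the
-- whole edge list for every cell (objective: faster).

-- ===== PORT A =====
-- A's heterogeneous line [nodea, count, count, …] is modelled as a List String with
-- str applied as each element is appended (str(nodea) = nodea).
def make_matrix_csv (nodes : List String) (edges : List (String × String)) : String :=
  let lines := nodes.foldl (fun lines nodea =>
    let line := nodes.foldl (fun line nodeb =>
      let count : Int := ((edges.filter (fun p => p.1 == nodea && p.2 == nodeb)).length : Int)
      line ++ [PySem.Int.toStr count]) [nodea]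
    lines ++ [PySem.Str.join "," line]) []
  PySem.Str.join "\n" lines

-- ===== PORT B =====
-- {n: i for i, n in enumerate(nodes)} — dict-comprehension loop; enumerate indices are
-- nonnegative Python ints, stored here as Nat.
def pvMkIndex : List String → Nat → PySem.Dict String Nat → PySem.Dict String Nat
  | [], _, d => d
  | x :: xs, i, d => pvMkIndex xs (i + 1) (d.insert x i)

-- matrix[i][j]; exact, since every index the dict yields is a valid row/column position.
def pvRead (m : List (List Int)) (i j : Nat) : Int := (m.getD i []).getD j 0

-- the loop body: if a in index and b in index: matrix[index[a]][index[b]] += 1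
def pvStep (d : PySem.Dict String Nat) (m : List (List Int)) (e : String × String) :
    List (List Int) :=
  if d.contains e.1 && d.contains e.2 then
    m.set (d.getD e.1 0)
      ((m.getD (d.getD e.1 0) []).set (d.getD e.2 0)
        ((m.getD (d.getD e.1 0) []).getD (d.getD e.2 0) 0 + 1))
  else m

def make_matrix_csv_alt (nodes : List String) (edges : List (String × String)) : String :=
  let index := pvMkIndex nodes 0 PySem.Dict.empty
  let size := nodes.length
  let matrix0 := nodes.map (fun _ => List.replicate size (0 : Int))
  let matrix := edges.foldl (pvStep index) matrix0
  PySem.Str.join "\n" (nodes.map (fun a =>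
    PySem.Str.join "," ([a] ++ nodes.map (fun b =>
      PySem.Int.toStr (pvRead matrix (index.getD a 0) (index.getD b 0))))))

-- ===== PRECONDITION & SPEC =====
def Spec_make_matrix_csv (nodes : List String) (edges : List (String × String)) (out : String) : Prop := out = make_matrix_csv_alt nodes edges
instance (nodes : List String) (edges : List (String × String)) (out : String) : Decidable (Spec_make_matrix_csv nodes edges out) := by unfold Spec_make_matrix_csv; infer_instance

-- ===== CLAIM (what is proved, stated in full; the proofs are below) =====
def Claim_equal_make_matrix_csv : Prop := ∀ (nodes : List String) (edges : List (String × String)), Dom_make_matrix_csv nodes edges → Spec_make_matrix_csv nodes edges (make_matrix_csv nodes edges)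

-- ===== LEMMAS AND PROOFS =====

-- a foldl that only appends one mapped element per step is acc ++ map
theorem foldl_append_map {α β : Type} (f : α → β) :
    ∀ (l : List α) (acc : List β),
      l.foldl (fun r x => r ++ [f x]) acc = acc ++ l.map f := by
  intro l
  induction l with
  | nil => simp
  | cons x xs ih => intro acc; simp [List.foldl, ih]

-- A's per-cell scan counts exactly the occurrences of the pair (a, b) in edges
theorem filter_length_eq_count (edges : List (String × String)) (a b : String) :
    ((edges.filter (fun p => p.1 == a && p.2 == b)).length : Int) = edges.count (a, b) := by
  have : (fun p : String × String => p.1 == a && p.2 == b) = (fun p => p == (a, b)) := by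
    funext p; rfl
  rw [List.count, List.countP_eq_length_filter, this]

-- pvMkIndex leaves absent keys alone
theorem get?_mkIndex_of_not_mem :
    ∀ (l : List String) (i : Nat) (d : PySem.Dict String Nat) (x : String), x ∉ l →
      (pvMkIndex l i d).get? x = d.get? x := by
  intro l
  induction l with
  | nil => intro i d x _; rfl
  | cons y ys ih =>
    intro i d x hx
    simp only [List.mem_cons, not_or] at hx
    rw [pvMkIndex, ih _ _ _ hx.2, PySem.Dict.get?_insert_of_ne _ _ hx.1]

-- every member of l is mapped to a valid position of l (its last occurrence)
theorem mkIndex_spec :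
    ∀ (l : List String) (i : Nat) (d : PySem.Dict String Nat) (x : String), x ∈ l →
      ∃ k, ∃ h : k < l.length, l[k] = x ∧ (pvMkIndex l i d).get? x = some (i + k) := by
  intro l
  induction l with
  | nil => intro _ _ x hx; simp at hx
  | cons y ys ih =>
    intro i d x hx
    by_cases hmem : x ∈ ys
    · obtain ⟨k, hk, hget, hval⟩ := ih (i + 1) (d.insert y i) x hmem
      exact ⟨k + 1, by simpa using Nat.succ_lt_succ hk,
        by simpa using hget, by rw [pvMkIndex, hval]; congr 1; omega⟩
    · have hxy : x = y := by rcases List.mem_cons.mp hx with h | h; exact h; exact absurd h hmem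
      refine ⟨0, Nat.succ_pos _, by simpa using hxy.symm, ?_⟩
      rw [pvMkIndex, get?_mkIndex_of_not_mem _ _ _ _ hmem, hxy,
        PySem.Dict.get?_insert_self]
      simp

-- set/getD interaction on lists (the set position in range)
theorem getD_set {α : Type} (l : List α) (i k : Nat) (v dflt : α) (hi : i < l.length) :
    (l.set i v).getD k dflt = if k = i then v else l.getD k dflt := by
  rw [List.getD_eq_getElem?_getD, List.getD_eq_getElem?_getD, List.getElem?_set]
  by_cases h : i = k
  · subst h; simp [hi]
  · simp [h, Ne.symm h]

theorem getD_mem_of_lt {α : Type} (l : List α) (i : Nat) (d : α) (h : i < l.length) :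
    l.getD i d ∈ l := by
  rw [List.getD_eq_getElem?_getD, List.getElem?_eq_getElem h]
  exact List.getElem_mem h

-- ===== the index built from nodes =====

theorem mkIndex_nodes_spec (nodes : List String) (x : String) (hx : x ∈ nodes) :
    ∃ k, ∃ h : k < nodes.length, nodes[k] = x ∧
      (pvMkIndex nodes 0 PySem.Dict.empty).get? x = some k := by
  obtain ⟨k, hk, hget, hval⟩ := mkIndex_spec nodes 0 PySem.Dict.empty x hx
  exact ⟨k, hk, hget, by simpa using hval⟩

theorem mkIndex_getD_lt (nodes : List String) (x : String) (hx : x ∈ nodes) :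
    (pvMkIndex nodes 0 PySem.Dict.empty).getD x 0 < nodes.length := by
  obtain ⟨k, hk, _, hval⟩ := mkIndex_nodes_spec nodes x hx
  simp [PySem.Dict.getD, hval, hk]

theorem mkIndex_getD_inj (nodes : List String) (x y : String) (hx : x ∈ nodes) (hy : y ∈ nodes)
    (h : (pvMkIndex nodes 0 PySem.Dict.empty).getD x 0
       = (pvMkIndex nodes 0 PySem.Dict.empty).getD y 0) : x = y := by
  obtain ⟨k, hk, hgk, hvk⟩ := mkIndex_nodes_spec nodes x hx
  obtain ⟨k', hk', hgk', hvk'⟩ := mkIndex_nodes_spec nodes y hy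
  have : k = k' := by simpa [PySem.Dict.getD, hvk, hvk'] using h
  subst this
  rw [← hgk, ← hgk']

theorem mkIndex_contains_iff (nodes : List String) (x : String) :
    (pvMkIndex nodes 0 PySem.Dict.empty).contains x = true ↔ x ∈ nodes := by
  constructor
  · intro h
    by_contra hx
    have hn : (pvMkIndex nodes 0 PySem.Dict.empty).get? x = none := by
      rw [get?_mkIndex_of_not_mem _ _ _ _ hx, PySem.Dict.get?_empty]
    rw [(PySem.Dict.get?_eq_none_iff_contains _ _).mp hn] at h
    exact Bool.false_ne_true h
  · intro hx
    obtain ⟨k, _, _, hval⟩ := mkIndex_nodes_spec nodes x hx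
    by_contra h
    have : (pvMkIndex nodes 0 PySem.Dict.empty).get? x = none :=
      (PySem.Dict.get?_eq_none_iff_contains _ _).mpr (by simpa using h)
    rw [hval] at this
    exact Option.some_ne_none _ this

-- ===== the matrix loop =====

-- step preserves the matrix shape
theorem pvStep_length (d : PySem.Dict String Nat) (m : List (List Int)) (e : String × String) :
    (pvStep d m e).length = m.length := by
  unfold pvStep; split_ifs <;> simp

theorem pvStep_rows (n : Nat) (d : PySem.Dict String Nat) (m : List (List Int))
    (e : String × String) (hm : ∀ r ∈ m, r.length = n) :
    ∀ r ∈ pvStep d m e, r.length = n := by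
  unfold pvStep
  split_ifs with h
  · by_cases hi : d.getD e.1 0 < m.length
    · intro r hr
      rcases List.mem_or_eq_of_mem_set hr with h' | h'
      · exact hm r h'
      · subst h'
        rw [List.length_set]
        exact hm _ (getD_mem_of_lt _ _ _ hi)
    · rw [List.set_eq_of_length_le (le_of_not_gt hi)]
      exact hm
  · exact hm

-- one step adds 1 at the cell addressed by the edge, read through node strings
theorem pvStep_read (nodes : List String) (e : String × String) (x y : String)
    (m : List (List Int)) (hlen : m.length = nodes.length)
    (hrows : ∀ r ∈ m, r.length = nodes.length) (hx : x ∈ nodes) (hy : y ∈ nodes) :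
    pvRead (pvStep (pvMkIndex nodes 0 PySem.Dict.empty) m e)
        ((pvMkIndex nodes 0 PySem.Dict.empty).getD x 0)
        ((pvMkIndex nodes 0 PySem.Dict.empty).getD y 0)
      = pvRead m ((pvMkIndex nodes 0 PySem.Dict.empty).getD x 0)
          ((pvMkIndex nodes 0 PySem.Dict.empty).getD y 0)
        + (if e = (x, y) then 1 else 0) := by
  unfold pvStep
  by_cases hc : ((pvMkIndex nodes 0 PySem.Dict.empty).contains e.1
      && (pvMkIndex nodes 0 PySem.Dict.empty).contains e.2) = true
  · rw [if_pos hc]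
    have he1 : e.1 ∈ nodes :=
      (mkIndex_contains_iff nodes e.1).mp (Bool.and_eq_true_iff.mp hc).1
    have he2 : e.2 ∈ nodes :=
      (mkIndex_contains_iff nodes e.2).mp (Bool.and_eq_true_iff.mp hc).2
    have hi1 : (pvMkIndex nodes 0 PySem.Dict.empty).getD e.1 0 < m.length := by
      rw [hlen]; exact mkIndex_getD_lt nodes e.1 he1
    have hrowlen : (m.getD ((pvMkIndex nodes 0 PySem.Dict.empty).getD e.1 0) []).length
        = nodes.length := hrows _ (getD_mem_of_lt _ _ _ hi1)
    unfold pvRead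
    rw [getD_set _ _ _ _ _ hi1]
    by_cases hxa : (pvMkIndex nodes 0 PySem.Dict.empty).getD x 0
        = (pvMkIndex nodes 0 PySem.Dict.empty).getD e.1 0
    · have hxeq : x = e.1 := mkIndex_getD_inj nodes x e.1 hx he1 hxa
      rw [if_pos hxa, hxa,
        getD_set _ _ _ _ _ (by rw [hrowlen]; exact mkIndex_getD_lt nodes e.2 he2)]
      by_cases hyb : (pvMkIndex nodes 0 PySem.Dict.empty).getD y 0
          = (pvMkIndex nodes 0 PySem.Dict.empty).getD e.2 0
      · have hyeq : y = e.2 := mkIndex_getD_inj nodes y e.2 hy he2 hyb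
        rw [if_pos hyb, hyb, if_pos (show e = (x, y) by rw [hxeq, hyeq])]
      · rw [if_neg hyb, if_neg (fun h => hyb (by subst h; rfl))]
        ring
    · rw [if_neg hxa, if_neg (fun h => hxa (by subst h; rfl))]
      ring
  · rw [if_neg hc]
    have hne : e ≠ (x, y) := by
      intro h
      subst h
      exact hc (by simp [(mkIndex_contains_iff nodes x).mpr hx,
        (mkIndex_contains_iff nodes y).mpr hy])
    rw [if_neg hne, add_zero]

-- the scatter loop computes, at the cell addressed by two node strings, the exact
-- number of occurrences of that pair among the processed edges
theorem loop_read (nodes : List String) :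
    ∀ (es : List (String × String)) (m : List (List Int)),
      m.length = nodes.length → (∀ r ∈ m, r.length = nodes.length) →
      ∀ x y, x ∈ nodes → y ∈ nodes →
        pvRead (es.foldl (pvStep (pvMkIndex nodes 0 PySem.Dict.empty)) m)
            ((pvMkIndex nodes 0 PySem.Dict.empty).getD x 0)
            ((pvMkIndex nodes 0 PySem.Dict.empty).getD y 0)
          = pvRead m ((pvMkIndex nodes 0 PySem.Dict.empty).getD x 0)
              ((pvMkIndex nodes 0 PySem.Dict.empty).getD y 0) + (es.count (x, y) : Int) := by
  intro es
  induction es with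
  | nil => intro m _ _ x y _ _; simp
  | cons e es ih =>
    intro m hlen hrows x y hx hy
    rw [List.foldl_cons,
      ih (pvStep (pvMkIndex nodes 0 PySem.Dict.empty) m e)
        (by rw [pvStep_length, hlen]) (pvStep_rows _ _ _ _ hrows) x y hx hy,
      pvStep_read nodes e x y m hlen hrows hx hy]
    rcases eq_or_ne e (x, y) with h | h
    · subst h
      rw [if_pos rfl, List.count_cons_self]
      push_cast
      ring
    · rw [if_neg h, List.count_cons_of_ne (by simpa using h)]
      ring

-- the zero matrix reads 0 everywhere
theorem read_zero (nodes : List String) (i j : Nat) :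
    pvRead (nodes.map (fun _ => List.replicate nodes.length (0 : Int))) i j = 0 := by
  unfold pvRead
  rw [List.getD_eq_getElem?_getD, List.getD_eq_getElem?_getD]
  rcases hM : (nodes.map fun _ => List.replicate nodes.length (0 : Int))[i]? with _ | r
  · simp
  · have hr : r = List.replicate nodes.length 0 := by
      rw [List.getElem?_map] at hM
      rcases h' : nodes[i]? with _ | v
      · rw [h'] at hM; simp at hM
      · rw [h'] at hM; simp at hM; exact hM.symm
    subst hr
    simp only [Option.getD_some]
    rcases Nat.lt_or_ge j nodes.length with hj | hj
    · simp [hj]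
    · rw [List.getElem?_eq_none (by simpa using hj)]; rfl

-- ===== VERDICT (by name: the statement is the Claim_ definition above) =====
theorem make_matrix_csv_spec : Claim_equal_make_matrix_csv := by
  intro nodes edges _
  unfold Spec_make_matrix_csv make_matrix_csv make_matrix_csv_alt
  rw [foldl_append_map]
  simp only [List.nil_append]
  congr 1
  apply List.map_congr_left
  intro a ha
  rw [foldl_append_map]
  congr 2
  apply List.map_congr_left
  intro b hb
  rw [filter_length_eq_count]
  congr 1
  rw [loop_read nodes edges _ (by simp)
      (by intro r hr; rcases List.mem_map.mp hr with ⟨_, _, rfl⟩; simp) a b ha hb,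
    read_zero]
  ring
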